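-- pv_equiv track=rewrite | github.com/francescamcgovern-debug/dinneroo-analysis | scripts/phase2_analysis/01_score_dishes.py | estimate_balanced
-- ===== SOURCE A (Python) =====
-- def estimate_balanced(dish_type):
--     """Estimate balanced/guilt-free score based on dish type."""
--     very_balanced = ['Salad', 'Grilled Chicken', 'Poke Bowl', 'Buddha Bowl', 'Grain Bowl',
--                      'Rice Bowl', 'Pho', 'Stir Fry']
--     balanced = ['Katsu', 'Teriyaki', 'Fajitas', 'Shawarma', 'Curry', 'Noodles']
--     neutral = ['Pad Thai', 'Ramen', 'Biryani', 'Sushi', 'Tacos']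
--     indulgent = ['Pizza', 'Burger', 'Mac & Cheese', 'Fish & Chips', 'Lasagne']
--
--     dish_lower = dish_type.lower()
--
--     for d in very_balanced:
--         if d.lower() in dish_lower:
--             return 5
--     for d in balanced:
--         if d.lower() in dish_lower:
--             return 4
--     for d in neutral:
--         if d.lower() in dish_lower:
--             return 3
--     for d in indulgent:
--         if d.lower() in dish_lower:
--             return 2
--
--     return 3  # Default
-- ===== SOURCE B (Python) =====
-- def estimate_balanced(dish_type):
--     """Estimate balanced/guilt-free score based on dish type."""
--     table = [
--         ('salad', 5), ('grilled chicken', 5), ('poke bowl', 5), ('buddha bowl', 5),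
--         ('grain bowl', 5), ('rice bowl', 5), ('pho', 5), ('stir fry', 5),
--         ('katsu', 4), ('teriyaki', 4), ('fajitas', 4), ('shawarma', 4),
--         ('curry', 4), ('noodles', 4),
--         ('pad thai', 3), ('ramen', 3), ('biryani', 3), ('sushi', 3), ('tacos', 3),
--         ('pizza', 2), ('burger', 2), ('mac & cheese', 2), ('fish & chips', 2),
--         ('lasagne', 2),
--     ]
--     d = dish_type.lower()
--     scores = [s for k, s in table if k in d]
--     return max(scores) if scores else 3
-- ===== Notes on version B (the rewrite author's own statement) =====
-- stated objective: simpler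
-- what changed: Replaced four priority-ordered loops with early returns by a single ordered keyword-to-score table scanned once, collecting every matching score and returning their max (default 3); valid because scores decrease with priority.
import Mathlib
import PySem

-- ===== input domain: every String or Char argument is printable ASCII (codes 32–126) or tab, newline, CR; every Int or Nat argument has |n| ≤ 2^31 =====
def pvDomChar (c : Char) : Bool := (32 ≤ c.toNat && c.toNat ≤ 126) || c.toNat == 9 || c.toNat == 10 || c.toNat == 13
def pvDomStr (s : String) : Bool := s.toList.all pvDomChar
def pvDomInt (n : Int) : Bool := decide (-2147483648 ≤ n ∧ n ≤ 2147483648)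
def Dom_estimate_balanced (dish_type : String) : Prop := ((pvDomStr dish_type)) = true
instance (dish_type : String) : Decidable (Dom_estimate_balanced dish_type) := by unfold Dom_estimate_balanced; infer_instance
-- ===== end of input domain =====

-- B replaces A's four priority-ordered early-return loops by one keyword→score table
-- scanned once, taking the max of all matching scores (default 3); objective: simpler.

-- ===== PORT A =====
-- A: four category lists, scanned in priority order with an early return per category.
def estimate_balanced (dish_type : String) : Int :=
  let very_balanced := ["Salad", "Grilled Chicken", "Poke Bowl", "Buddha Bowl", "Grain Bowl",
                        "Rice Bowl", "Pho", "Stir Fry"]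
  let balanced := ["Katsu", "Teriyaki", "Fajitas", "Shawarma", "Curry", "Noodles"]
  let neutral := ["Pad Thai", "Ramen", "Biryani", "Sushi", "Tacos"]
  let indulgent := ["Pizza", "Burger", "Mac & Cheese", "Fish & Chips", "Lasagne"]
  let dish_lower := PySem.Str.lower dish_type
  -- each 'for d in L: if cond(d): return c' is an any-with-early-return over L
  if very_balanced.any (fun d => PySem.Str.isIn (PySem.Str.lower d) dish_lower) then 5
  else if balanced.any (fun d => PySem.Str.isIn (PySem.Str.lower d) dish_lower) then 4
  else if neutral.any (fun d => PySem.Str.isIn (PySem.Str.lower d) dish_lower) then 3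
  else if indulgent.any (fun d => PySem.Str.isIn (PySem.Str.lower d) dish_lower) then 2
  else 3

-- ===== PORT B =====
-- B: one ordered (keyword, score) table; collect every matching score, then max (default 3).
def estimate_balanced_alt (dish_type : String) : Int :=
  let table : List (String × Int) :=
    [("salad", 5), ("grilled chicken", 5), ("poke bowl", 5), ("buddha bowl", 5),
     ("grain bowl", 5), ("rice bowl", 5), ("pho", 5), ("stir fry", 5),
     ("katsu", 4), ("teriyaki", 4), ("fajitas", 4), ("shawarma", 4),
     ("curry", 4), ("noodles", 4),
     ("pad thai", 3), ("ramen", 3), ("biryani", 3), ("sushi", 3), ("tacos", 3),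
     ("pizza", 2), ("burger", 2), ("mac & cheese", 2), ("fish & chips", 2),
     ("lasagne", 2)]
  let d := PySem.Str.lower dish_type
  let scores := table.filterMap (fun e => if PySem.Str.isIn e.1 d then some e.2 else none)
  match PySem.List.max? scores (fun x => x) with
  | some m => m
  | none => 3

-- ===== PRECONDITION & SPEC =====
def Spec_estimate_balanced (dish_type : String) (out : Int) : Prop := out = estimate_balanced_alt dish_type
instance (dish_type : String) (out : Int) : Decidable (Spec_estimate_balanced dish_type out) := by unfold Spec_estimate_balanced; infer_instance

-- ===== CLAIM (what is proved, stated in full; the proofs are below) =====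
def Claim_equal_estimate_balanced : Prop := ∀ (dish_type : String), Dom_estimate_balanced dish_type → Spec_estimate_balanced dish_type (estimate_balanced dish_type)

-- ===== LEMMAS AND PROOFS =====

-- max? picks c when c occurs and bounds every element
theorem pv_max?_eq_of_mem_of_le (xs : List Int) (c : Int) (hc : c ∈ xs)
    (hle : ∀ y ∈ xs, y ≤ c) : PySem.List.max? xs (fun x => x) = some c := by
  cases h : PySem.List.max? xs (fun x => x) with
  | none =>
      rw [PySem.List.max?_eq_none_iff] at h
      simp [h] at hc
  | some m =>
      have hm := PySem.List.max?_mem h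
      have h1 := PySem.List.max?_isMax h c hc
      have h2 := hle m hm
      simp only [Option.some.injEq]
      omega

-- the generic shape: priority-ordered early returns = max over the concatenated table
theorem pv_priority_eq_max (q : String → Bool) (T5 T4 T3 T2 : List (String × Int))
    (h5 : ∀ e ∈ T5, e.2 = (5 : Int)) (h4 : ∀ e ∈ T4, e.2 = (4 : Int))
    (h3 : ∀ e ∈ T3, e.2 = (3 : Int)) (h2 : ∀ e ∈ T2, e.2 = (2 : Int)) :
    (if T5.any (fun e => q e.1) then (5 : Int)
     else if T4.any (fun e => q e.1) then 4
     else if T3.any (fun e => q e.1) then 3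
     else if T2.any (fun e => q e.1) then 2
     else 3)
    = (match PySem.List.max?
          ((T5 ++ T4 ++ T3 ++ T2).filterMap (fun e => if q e.1 then some e.2 else none))
          (fun x => x) with
       | some m => m
       | none => 3) := by
  set f : String × Int → Option Int := fun e => if q e.1 then some e.2 else none with hf
  set xs := (T5 ++ T4 ++ T3 ++ T2).filterMap f with hxs
  have hmem : ∀ y ∈ xs, ∃ e, (e ∈ T5 ∨ e ∈ T4 ∨ e ∈ T3 ∨ e ∈ T2) ∧ q e.1 = true ∧ y = e.2 := by
    intro y hy
    simp only [hxs, List.mem_filterMap, List.mem_append, hf] at hy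
    obtain ⟨e, he, hfe⟩ := hy
    by_cases hq : q e.1 = true
    · refine ⟨e, by tauto, hq, ?_⟩
      simp only [hq, if_true, Option.some.injEq] at hfe
      omega
    · simp [hq] at hfe
  have hin : ∀ (T : List (String × Int)) (c : Int) (e : String × Int), e ∈ T →
      (T ⊆ T5 ++ T4 ++ T3 ++ T2) → q e.1 = true → e.2 = c → c ∈ xs := by
    intro T c e he hsub hq hc
    simp only [hxs, List.mem_filterMap, hf]
    exact ⟨e, hsub he, by simp [hq, hc]⟩
  have hs5 : T5 ⊆ T5 ++ T4 ++ T3 ++ T2 := by intro a ha; simp [ha]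
  have hs4 : T4 ⊆ T5 ++ T4 ++ T3 ++ T2 := by intro a ha; simp [ha]
  have hs3 : T3 ⊆ T5 ++ T4 ++ T3 ++ T2 := by intro a ha; simp [ha]
  have hs2 : T2 ⊆ T5 ++ T4 ++ T3 ++ T2 := by intro a ha; simp [ha]
  by_cases a5 : T5.any (fun e => q e.1) = true
  · obtain ⟨e, he, hq⟩ := List.any_eq_true.mp a5
    have hmax := pv_max?_eq_of_mem_of_le xs 5 (hin T5 5 e he hs5 hq (h5 e he)) (by
      intro y hy
      obtain ⟨e', he', hq', hy'⟩ := hmem y hy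
      rcases he' with h | h | h | h
      · have := h5 e' h; omega
      · have := h4 e' h; omega
      · have := h3 e' h; omega
      · have := h2 e' h; omega)
    simp [a5, hmax]
  · by_cases a4 : T4.any (fun e => q e.1) = true
    · obtain ⟨e, he, hq⟩ := List.any_eq_true.mp a4
      have hmax := pv_max?_eq_of_mem_of_le xs 4 (hin T4 4 e he hs4 hq (h4 e he)) (by
        intro y hy
        obtain ⟨e', he', hq', hy'⟩ := hmem y hy
        rcases he' with h | h | h | h
        · exact absurd (List.any_eq_true.mpr ⟨e', h, hq'⟩) a5
        · have := h4 e' h; omega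
        · have := h3 e' h; omega
        · have := h2 e' h; omega)
      simp [a5, a4, hmax]
    · by_cases a3 : T3.any (fun e => q e.1) = true
      · obtain ⟨e, he, hq⟩ := List.any_eq_true.mp a3
        have hmax := pv_max?_eq_of_mem_of_le xs 3 (hin T3 3 e he hs3 hq (h3 e he)) (by
          intro y hy
          obtain ⟨e', he', hq', hy'⟩ := hmem y hy
          rcases he' with h | h | h | h
          · exact absurd (List.any_eq_true.mpr ⟨e', h, hq'⟩) a5
          · exact absurd (List.any_eq_true.mpr ⟨e', h, hq'⟩) a4
          · have := h3 e' h; omega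
          · have := h2 e' h; omega)
        simp [a5, a4, a3, hmax]
      · by_cases a2 : T2.any (fun e => q e.1) = true
        · obtain ⟨e, he, hq⟩ := List.any_eq_true.mp a2
          have hmax := pv_max?_eq_of_mem_of_le xs 2 (hin T2 2 e he hs2 hq (h2 e he)) (by
            intro y hy
            obtain ⟨e', he', hq', hy'⟩ := hmem y hy
            rcases he' with h | h | h | h
            · exact absurd (List.any_eq_true.mpr ⟨e', h, hq'⟩) a5
            · exact absurd (List.any_eq_true.mpr ⟨e', h, hq'⟩) a4
            · exact absurd (List.any_eq_true.mpr ⟨e', h, hq'⟩) a3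
            · have := h2 e' h; omega)
          simp [a5, a4, a3, a2, hmax]
        · have hnil : xs = [] := by
            rcases hx : xs with _ | ⟨y, ys⟩
            · rfl
            · exfalso
              have hy : y ∈ xs := by rw [hx]; exact List.mem_cons_self ..
              obtain ⟨e', he', hq', _⟩ := hmem y hy
              rcases he' with h | h | h | h
              · exact absurd (List.any_eq_true.mpr ⟨e', h, hq'⟩) a5
              · exact absurd (List.any_eq_true.mpr ⟨e', h, hq'⟩) a4
              · exact absurd (List.any_eq_true.mpr ⟨e', h, hq'⟩) a3
              · exact absurd (List.any_eq_true.mpr ⟨e', h, hq'⟩) a2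
          have hmax : PySem.List.max? xs (fun x => x) = none := by
            rw [PySem.List.max?_eq_none_iff]; exact hnil
          simp [a5, a4, a3, a2, hmax]

-- ===== VERDICT (by name: the statement is the Claim_ definition above) =====
theorem estimate_balanced_spec : Claim_equal_estimate_balanced := by
  intro dish _
  show estimate_balanced dish = estimate_balanced_alt dish
  have key := pv_priority_eq_max (fun k => PySem.Str.isIn k (PySem.Str.lower dish))
    [("salad", 5), ("grilled chicken", 5), ("poke bowl", 5), ("buddha bowl", 5), ("grain bowl", 5), ("rice bowl", 5), ("pho", 5), ("stir fry", 5)]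
    [("katsu", 4), ("teriyaki", 4), ("fajitas", 4), ("shawarma", 4), ("curry", 4), ("noodles", 4)]
    [("pad thai", 3), ("ramen", 3), ("biryani", 3), ("sushi", 3), ("tacos", 3)]
    [("pizza", 2), ("burger", 2), ("mac & cheese", 2), ("fish & chips", 2), ("lasagne", 2)]
    (by decide) (by decide) (by decide) (by decide)
  simp only [List.any_cons, List.any_nil, List.cons_append, List.nil_append] at key
  simp only [estimate_balanced, estimate_balanced_alt, List.any_cons, List.any_nil,
    show PySem.Str.lower "Salad" = "salad" from by decide, show PySem.Str.lower "Grilled Chicken" = "grilled chicken" from by decide, show PySem.Str.lower "Poke Bowl" = "poke bowl" from by decide, show PySem.Str.lower "Buddha Bowl" = "buddha bowl" from by decide, show PySem.Str.lower "Grain Bowl" = "grain bowl" from by decide, show PySem.Str.lower "Rice Bowl" = "rice bowl" from by decide, show PySem.Str.lower "Pho" = "pho" from by decide, show PySem.Str.lower "Stir Fry" = "stir fry" from by decide, show PySem.Str.lower "Katsu" = "katsu" from by decide, show PySem.Str.lower "Teriyaki" = "teriyaki" from by decide, show PySem.Str.lower "Fajitas" = "fajitas" from by decide, show PySem.Str.lower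 "Shawarma" = "shawarma" from by decide, show PySem.Str.lower "Curry" = "curry" from by decide, show PySem.Str.lower "Noodles" = "noodles" from by decide, show PySem.Str.lower "Pad Thai" = "pad thai" from by decide, show PySem.Str.lower "Ramen" = "ramen" from by decide, show PySem.Str.lower "Biryani" = "biryani" from by decide, show PySem.Str.lower "Sushi" = "sushi" from by decide, show PySem.Str.lower "Tacos" = "tacos" from by decide, show PySem.Str.lower "Pizza" = "pizza" from by decide, show PySem.Str.lower "Burger" = "burger" from by decide, show PySem.Str.lower "Mac & Cheese" = "mac & cheese" from by decide, show PySem.Str.lower "Fish & Chips" = "fish & chips" from by decide, show PySem.Str.lower "Lasagne" = "lasagne" from by decide]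
  exact key
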